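-- pv_equiv track=rewrite | github.com/nirkog/filmby | package/filmby/venues/cinemas/israel/jaffa.py | parse_length
-- ===== SOURCE A (Python) =====
-- def parse_length(text):
--     text = "".join([x for x in text if x in " 0123456789"])
--     parts = [x for x in text.split(" ") if x != ""]
--     hours = int(parts[0])
--
--     if len(parts) > 1:
--         minutes = int(parts[1])
--     else:
--         minutes = 0
--
--     return hours * 60 + minutes
-- ===== SOURCE B (Python) =====
-- def parse_length(text):
--     # Single fused scan: accumulate maximal digit runs (non-space, non-digit
--     # characters are skipped, so they merge adjacent digit runs, as in A).
--     tokens = []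
--     run = ""
--     for c in text:
--         if c in "0123456789":
--             run += c
--         elif c == " " and run:
--             tokens.append(run)
--             run = ""
--     if run:
--         tokens.append(run)
--
--     hours = int(tokens[0])
--     minutes = int(tokens[1]) if len(tokens) > 1 else 0
--     return hours * 60 + minutes
-- ===== Notes on version B (the rewrite author's own statement) =====
-- stated objective: alternative
-- what changed: Replaces A's three passes (filter comprehension + join, split(" "), non-empty filter comprehension) by a single fused scan that accumulates maximal digit runs directly with a run accumulator.
import Mathlib
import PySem

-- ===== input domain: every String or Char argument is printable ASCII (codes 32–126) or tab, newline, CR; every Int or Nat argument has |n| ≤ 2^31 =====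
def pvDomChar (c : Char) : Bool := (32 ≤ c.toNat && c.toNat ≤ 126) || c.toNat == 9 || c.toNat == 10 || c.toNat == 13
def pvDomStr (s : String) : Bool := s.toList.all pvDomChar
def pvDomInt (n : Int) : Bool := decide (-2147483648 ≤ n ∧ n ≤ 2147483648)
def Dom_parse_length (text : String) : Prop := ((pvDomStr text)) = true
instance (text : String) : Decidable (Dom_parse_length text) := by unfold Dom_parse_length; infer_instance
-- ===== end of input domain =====

-- B replaces A's three passes (char filter + split(" ") + non-empty filter) by one fused scan
-- accumulating maximal digit runs; same cost, different decomposition.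


-- ===== PORT A =====
def parse_length (text : String) : Int :=
  -- text = "".join([x for x in text if x in " 0123456789"])
  let t := text.toList.filter (fun c => (" 0123456789".toList).contains c)
  -- parts = [x for x in text.split(" ") if x != ""]
  let parts := ((PySem.Chars.split? t [' ']).getD []).filter (fun p => p ≠ [])
  -- hours = int(parts[0])  (parts[0] raises IndexError on empty: excluded by Pre_)
  let hours := (PySem.Int.ofChars? ((PySem.List.pyGet? parts 0).getD [])).getD 0
  -- minutes = int(parts[1]) if len(parts) > 1 else 0
  let minutes := if 1 < parts.length then (PySem.Int.ofChars? ((PySem.List.pyGet? parts 1).getD [])).getD 0 else 0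
  hours * 60 + minutes

-- ===== PORT B =====
-- loop body: digits extend the run, a space closes a non-empty run, all else is skipped
def pl_step (st : List (List Char) × List Char) (c : Char) : List (List Char) × List Char :=
  if ("0123456789".toList).contains c then (st.1, st.2 ++ [c])
  else if c = ' ' ∧ st.2 ≠ [] then (st.1 ++ [st.2], [])
  else st

def parse_length_alt (text : String) : Int :=
  let st := text.toList.foldl pl_step ([], [])
  let tokens := if st.2 ≠ [] then st.1 ++ [st.2] else st.1
  -- hours = int(tokens[0])  (tokens[0] raises IndexError on empty: excluded by Pre_)
  let hours := (PySem.Int.ofChars? ((PySem.List.pyGet? tokens 0).getD [])).getD 0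
  let minutes := if 1 < tokens.length then (PySem.Int.ofChars? ((PySem.List.pyGet? tokens 1).getD [])).getD 0 else 0
  hours * 60 + minutes

-- ===== PRECONDITION & SPEC =====
-- Pre_: the text contains at least one digit; otherwise parts/tokens is empty and BOTH
-- Pythons raise IndexError on its [0] (no value is returned, so nothing is claimed there).
def Pre_parse_length (text : String) : Prop :=
  (text.toList.any (fun c => ("0123456789".toList).contains c)) = true
instance (text : String) : Decidable (Pre_parse_length text) := by unfold Pre_parse_length; infer_instance
def pvWitness_parse_length : String := "1 30"

def Spec_parse_length (text : String) (out : Int) : Prop := out = parse_length_alt text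
instance (text : String) (out : Int) : Decidable (Spec_parse_length text out) := by unfold Spec_parse_length; infer_instance

-- ===== CLAIM (what is proved, stated in full; the proofs are below) =====
def Claim_equal_parse_length : Prop := ∀ (text : String), Dom_parse_length text → Pre_parse_length text → Spec_parse_length text (parse_length text)

-- ===== LEMMAS AND PROOFS =====

-- reference splitter: Python's split(" ") on a char list, with an accumulated (reversed) current piece
def splitSp : List Char → List Char → List (List Char)
  | [], cur => [cur.reverse]
  | c :: rest, cur => if c = ' ' then cur.reverse :: splitSp rest [] else splitSp rest (c :: cur)

theorem splitOn_go_eq_splitSp (l : List Char) : ∀ (fuel : Nat) (cur : List Char) (acc : List (List Char)),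
    l.length ≤ fuel →
    PySem.Chars.splitOn.go [' '] fuel l cur acc = acc.reverse ++ splitSp l cur := by
  induction l with
  | nil =>
    intro fuel cur acc _
    cases fuel <;> simp [PySem.Chars.splitOn.go, splitSp]
  | cons c rest ih =>
    intro fuel cur acc hf
    cases fuel with
    | zero => simp at hf
    | succ f =>
      have hf' : rest.length ≤ f := by simp at hf; omega
      have hstep : PySem.Chars.splitOn.go [' '] (f+1) (c :: rest) cur acc =
          if [' '].isPrefixOf (c :: rest) then
            PySem.Chars.splitOn.go [' '] f (List.drop [' '].length (c :: rest)) [] (cur.reverse :: acc)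
          else PySem.Chars.splitOn.go [' '] f rest (c :: cur) acc := rfl
      rw [hstep]
      by_cases hc : c = ' '
      · subst hc
        rw [if_pos (by simp [List.isPrefixOf])]
        simp only [List.length_cons, List.length_nil, List.drop_succ_cons, List.drop_zero]
        rw [ih f [] (cur.reverse :: acc) hf']
        simp [splitSp]
      · have hpre : ([' ']).isPrefixOf (c :: rest) = false := by
          simp [List.isPrefixOf]
          exact fun h => absurd h.symm hc
        rw [if_neg (by simp [hpre])]
        rw [ih f (c :: cur) acc hf']
        simp [splitSp, hc]

theorem splitOn_eq_splitSp (l : List Char) :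
    PySem.Chars.splitOn l [' '] = splitSp l [] := by
  have := splitOn_go_eq_splitSp l (l.length + 1) [] [] (by omega)
  simpa [PySem.Chars.splitOn] using this

def pvKeep (c : Char) : Bool := (" 0123456789".toList).contains c

theorem pl_step_skip (st : List (List Char) × List Char) (c : Char) (h : pvKeep c = false) :
    pl_step st c = st := by
  simp only [pvKeep] at h
  simp at h
  simp [pl_step, h]

theorem foldl_filter_keep (cs : List Char) (st : List (List Char) × List Char) :
    cs.foldl pl_step st = (cs.filter pvKeep).foldl pl_step st := by
  induction cs generalizing st with
  | nil => rfl
  | cons c rest ih =>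
    by_cases h : pvKeep c = true
    · simp [h, ih]
    · simp only [Bool.not_eq_true] at h
      simp [h, ih, pl_step_skip _ _ h]

def pvFinal (st : List (List Char) × List Char) : List (List Char) :=
  if st.2 ≠ [] then st.1 ++ [st.2] else st.1

theorem fold_eq_splitSp (ds : List Char) : ∀ (tok : List (List Char)) (run : List Char),
    (∀ c ∈ ds, pvKeep c = true) →
    pvFinal (ds.foldl pl_step (tok, run)) = tok ++ (splitSp ds run.reverse).filter (fun p => p ≠ []) := by
  induction ds with
  | nil =>
    intro tok run _
    by_cases h : run = [] <;> simp [pvFinal, splitSp, h]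
  | cons c rest ih =>
    intro tok run hall
    have hk : pvKeep c = true := hall c (by simp)
    have hrest : ∀ x ∈ rest, pvKeep x = true := fun x hx => hall x (by simp [hx])
    by_cases hc : c = ' '
    · subst hc
      by_cases hr : run = []
      · subst hr
        have hstep : pl_step (tok, ([] : List Char)) ' ' = (tok, []) := by simp [pl_step]
        simp only [List.foldl_cons, hstep]
        rw [ih tok [] hrest]
        simp [splitSp]
      · have hstep : pl_step (tok, run) ' ' = (tok ++ [run], []) := by
          simp [pl_step, hr]
        simp only [List.foldl_cons, hstep]
        rw [ih (tok ++ [run]) [] hrest]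
        simp [splitSp, hr]
    · have hd' : c = '0' ∨ c = '1' ∨ c = '2' ∨ c = '3' ∨ c = '4' ∨ c = '5' ∨ c = '6' ∨ c = '7' ∨ c = '8' ∨ c = '9' := by
        have hk' := hk
        simp [pvKeep] at hk'
        tauto
      have hstep : pl_step (tok, run) c = (tok, run ++ [c]) := by
        rcases hd' with rfl | rfl | rfl | rfl | rfl | rfl | rfl | rfl | rfl | rfl <;> simp [pl_step]
      simp only [List.foldl_cons, hstep]
      rw [ih tok (run ++ [c]) hrest]
      simp [splitSp, hc]

theorem tokens_eq_parts (text : String) :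
    (if (text.toList.foldl pl_step ([], [])).2 ≠ [] then
        (text.toList.foldl pl_step ([], [])).1 ++ [(text.toList.foldl pl_step ([], [])).2]
      else (text.toList.foldl pl_step ([], [])).1) =
      ((PySem.Chars.split? (text.toList.filter (fun c => (" 0123456789".toList).contains c)) [' ']).getD []).filter (fun p => p ≠ []) := by
  have h1 := foldl_filter_keep text.toList (([] : List (List Char)), ([] : List Char))
  have h2 := fold_eq_splitSp (text.toList.filter pvKeep) [] []
      (fun c hc => (List.mem_filter.mp hc).2)
  have h3 : PySem.Chars.split? (List.filter pvKeep text.toList) [' ']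
      = some (splitSp (List.filter pvKeep text.toList) []) := by
    simp [PySem.Chars.split?, splitOn_eq_splitSp]
  simp only [pvFinal, List.reverse_nil, List.nil_append] at h2
  rw [show (fun c => (" 0123456789".toList).contains c) = pvKeep from rfl, h3, h1]
  simpa using h2

-- ===== VERDICT (by name: the statement is the Claim_ definition above) =====
theorem parse_length_spec : Claim_equal_parse_length := by
  intro text _ _
  unfold Spec_parse_length parse_length parse_length_alt
  simp only [tokens_eq_parts text]
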